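-- pv_equiv track=rewrite | github.com/WonderOfstU/flash-linear-attention | scripts/visualize_headwise_config.py | _collect_retrieval_heads
-- ===== SOURCE A (Python) =====
-- from typing import Dict, List, Tuple
--
-- def _collect_retrieval_heads(
--     layer_keys: List[int], matrix: List[List[int]]
-- ) -> Tuple[Dict[int, List[int]], List[Tuple[int, int]]]:
--     by_layer: Dict[int, List[int]] = {}
--     pairs: List[Tuple[int, int]] = []
--     for layer_idx, heads in zip(layer_keys, matrix):
--         retrieval = [head_idx for head_idx, flag in enumerate(heads) if flag == 1]
--         by_layer[layer_idx] = retrieval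
--         pairs.extend((layer_idx, head_idx) for head_idx in retrieval)
--     return by_layer, pairs
-- ===== SOURCE B (Python) =====
-- from typing import Dict, List, Tuple
--
-- def _solve(rows: List[Tuple[int, List[int]]]) -> Tuple[Dict[int, List[int]], List[Tuple[int, int]]]:
--     if len(rows) <= 1:
--         if not rows:
--             return {}, []
--         layer_idx, heads = rows[0]
--         retrieval = [head_idx for head_idx, flag in enumerate(heads) if flag == 1]
--         return {layer_idx: retrieval}, [(layer_idx, head_idx) for head_idx in retrieval]
--     mid = len(rows) // 2
--     left_by, left_pairs = _solve(rows[:mid])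
--     right_by, right_pairs = _solve(rows[mid:])
--     left_by.update(right_by)
--     return left_by, left_pairs + right_pairs
--
-- def _collect_retrieval_heads(
--     layer_keys: List[int], matrix: List[List[int]]
-- ) -> Tuple[Dict[int, List[int]], List[Tuple[int, int]]]:
--     return _solve(list(zip(layer_keys, matrix)))
-- ===== Notes on version B (the rewrite author's own statement) =====
-- stated objective: alternative
-- what changed: B replaces A's single forward loop with one mutable accumulator pair by a divide-and-conquer recursion: it splits the zipped rows in half, solves each half independently, and merges the two results with dict.update and list concatenation.
import Mathlib
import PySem

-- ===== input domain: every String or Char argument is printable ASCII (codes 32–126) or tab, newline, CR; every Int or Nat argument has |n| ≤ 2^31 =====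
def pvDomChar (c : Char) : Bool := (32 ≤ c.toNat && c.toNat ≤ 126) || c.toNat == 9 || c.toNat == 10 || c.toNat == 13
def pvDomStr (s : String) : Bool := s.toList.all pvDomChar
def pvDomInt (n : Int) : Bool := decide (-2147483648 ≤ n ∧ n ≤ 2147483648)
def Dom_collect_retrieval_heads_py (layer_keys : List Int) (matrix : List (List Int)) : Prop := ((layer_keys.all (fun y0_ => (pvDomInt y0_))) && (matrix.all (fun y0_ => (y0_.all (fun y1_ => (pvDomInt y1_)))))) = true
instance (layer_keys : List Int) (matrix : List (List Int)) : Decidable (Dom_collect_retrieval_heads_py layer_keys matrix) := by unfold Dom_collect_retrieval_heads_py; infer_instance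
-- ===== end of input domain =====

-- B replaces A's single forward loop with a mutable accumulator pair by a divide-and-conquer
-- recursion that solves each half of the zipped rows and merges with dict.update; objective: alternative.

-- shared helper: [head_idx for head_idx, flag in enumerate(heads) if flag == 1]
def pvRetrieval (heads : List Int) : List Int :=
  ((PySem.List.enumerate heads).filter (fun p => p.2 == 1)).map (fun p => p.1)

-- ===== PORT A =====
def collect_retrieval_heads_py (layer_keys : List Int) (matrix : List (List Int)) : (List (Int × List Int)) × (List (Int × Int)) :=
  let st := (layer_keys.zip matrix).foldl
    (fun (st : PySem.Dict Int (List Int) × List (Int × Int)) p =>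
      let retrieval := pvRetrieval p.2
      (st.1.insert p.1 retrieval, st.2 ++ retrieval.map (fun h => (p.1, h))))
    (PySem.Dict.empty, [])
  (st.1.items, st.2)

-- ===== PORT B =====
-- _solve: divide and conquer over the zipped rows
def pvSolve (rows : List (Int × List Int)) : PySem.Dict Int (List Int) × List (Int × Int) :=
  if _h : rows.length ≤ 1 then
    match rows with
    | [] => (PySem.Dict.empty, [])
    | p :: _ =>
      let retrieval := pvRetrieval p.2
      (PySem.Dict.empty.insert p.1 retrieval, retrieval.map (fun hd => (p.1, hd)))
  else
    let mid := rows.length / 2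
    let left := pvSolve (rows.take mid)
    let right := pvSolve (rows.drop mid)
    (left.1.update right.1.items, left.2 ++ right.2)
termination_by rows.length
decreasing_by
  · simp only [List.length_take]; omega
  · simp only [List.length_drop]; omega

def collect_retrieval_heads_py_alt (layer_keys : List Int) (matrix : List (List Int)) : (List (Int × List Int)) × (List (Int × Int)) :=
  let s := pvSolve (layer_keys.zip matrix)
  (s.1.items, s.2)

-- ===== PRECONDITION & SPEC =====
def Spec_collect_retrieval_heads_py (layer_keys : List Int) (matrix : List (List Int)) (out : (List (Int × List Int)) × (List (Int × Int))) : Prop := out = collect_retrieval_heads_py_alt layer_keys matrix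
instance (layer_keys : List Int) (matrix : List (List Int)) (out : (List (Int × List Int)) × (List (Int × Int))) : Decidable (Spec_collect_retrieval_heads_py layer_keys matrix out) := by unfold Spec_collect_retrieval_heads_py; infer_instance

-- ===== CLAIM (what is proved, stated in full; the proofs are below) =====
def Claim_equal_collect_retrieval_heads_py : Prop := ∀ (layer_keys : List Int) (matrix : List (List Int)), Dom_collect_retrieval_heads_py layer_keys matrix → Spec_collect_retrieval_heads_py layer_keys matrix (collect_retrieval_heads_py layer_keys matrix)

-- ===== LEMMAS AND PROOFS =====

-- A's dict fold, abbreviated for the proofs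
def pvG (d : PySem.Dict Int (List Int)) (l : List (Int × List Int)) : PySem.Dict Int (List Int) :=
  l.foldl (fun d p => d.insert p.1 (pvRetrieval p.2)) d

-- A's fold over a pair state splits into the dict fold and an appended pairs list.
theorem pvFold_split (l : List (Int × List Int)) (d : PySem.Dict Int (List Int)) (acc : List (Int × Int)) :
    l.foldl
      (fun (st : PySem.Dict Int (List Int) × List (Int × Int)) p =>
        let retrieval := pvRetrieval p.2
        (st.1.insert p.1 retrieval, st.2 ++ retrieval.map (fun h => (p.1, h))))
      (d, acc)
    = (pvG d l, acc ++ l.flatMap (fun p => (pvRetrieval p.2).map (fun h => (p.1, h)))) := by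
  induction l generalizing d acc with
  | nil => simp [pvG]
  | cons x xs ih => simp [pvG, List.foldl_cons, ih, List.flatMap_cons]

-- two inserts at distinct keys commute when the first key is already present
theorem pvInsert_swap (d : PySem.Dict Int (List Int)) (k b : Int) (v w : List Int)
    (hc : d.contains k = true) (hne : b ≠ k) :
    (d.insert b w).insert k v = (d.insert k v).insert b w := by
  by_cases hb : d.contains b = true
  · apply PySem.Dict.ext
    rw [PySem.Dict.items_insert_of_contains _ v (by simp [PySem.Dict.contains_insert, hc]),
        PySem.Dict.items_insert_of_contains _ w hb,
        PySem.Dict.items_insert_of_contains _ w (by simp [PySem.Dict.contains_insert, hb]),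
        PySem.Dict.items_insert_of_contains _ v hc]
    simp only [List.map_map]
    apply List.map_congr_left
    intro p _
    by_cases h1 : p.1 = b <;> by_cases h2 : p.1 = k <;> simp_all
  · apply PySem.Dict.ext
    have hb' : d.contains b = false := by simp_all
    rw [PySem.Dict.items_insert_of_contains _ v (by simp [PySem.Dict.contains_insert, hc]),
        PySem.Dict.items_insert_of_not_contains _ w hb',
        PySem.Dict.items_insert_of_not_contains _ w
          (by simp [PySem.Dict.contains_insert, hb', hne]),
        PySem.Dict.items_insert_of_contains _ v hc]
    simp [hne]

-- update commutes past an insert of a key absent from the pair list, when the key is present in d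
theorem pvUpdate_insert_comm (ps : List (Int × List Int)) (k : Int) (v : List Int) :
    ∀ (d : PySem.Dict Int (List Int)), k ∉ ps.map (·.1) → d.contains k = true →
    (d.update ps).insert k v = (d.insert k v).update ps := by
  induction ps with
  | nil => intro d _ _; simp [PySem.Dict.update]
  | cons b ps ih =>
    intro d hmem hc
    simp only [List.map_cons, List.mem_cons, not_or] at hmem
    have hb : b.1 ≠ k := fun h => hmem.1 h.symm
    simp only [PySem.Dict.update, List.foldl_cons]
    rw [← PySem.Dict.update, ← PySem.Dict.update,
        ih (d.insert b.1 b.2) hmem.2 (by simp [PySem.Dict.contains_insert, hc]),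
        pvInsert_swap d k b.1 v b.2 hc hb]

-- updating with a replaced-in-place items list is an insert after the update
theorem pvUpdate_map_replace (ps : List (Int × List Int)) (k : Int) (v : List Int) :
    ∀ (d : PySem.Dict Int (List Int)), (ps.map (·.1)).Nodup → k ∈ ps.map (·.1) →
    d.update (ps.map (fun p => if p.1 == k then (k, v) else p)) = (d.update ps).insert k v := by
  induction ps with
  | nil => intro d _ h; simp at h
  | cons a ps ih =>
    intro d hnd hmem
    obtain ⟨a1, a2⟩ := a
    by_cases ha : a1 = k
    · subst ha
      have hk : a1 ∉ ps.map (·.1) := by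
        simp only [List.map_cons, List.nodup_cons] at hnd; exact hnd.1
      have hid : ps.map (fun p => if p.1 == a1 then (a1, v) else p) = ps := by
        refine (List.map_congr_left ?_).trans (List.map_id ps)
        intro p hp
        have : p.1 ≠ a1 := fun h => hk (h ▸ List.mem_map_of_mem hp)
        simp [this]
      simp only [List.map_cons, beq_self_eq_true, if_pos, hid]
      simp only [PySem.Dict.update, List.foldl_cons]
      rw [← PySem.Dict.update, ← PySem.Dict.update,
          pvUpdate_insert_comm ps a1 v (d.insert a1 a2) hk
            (PySem.Dict.contains_insert_self d a1 a2),
          PySem.Dict.insert_insert_self]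
    · have hmem' : k ∈ ps.map (·.1) := by
        simp only [List.map_cons, List.mem_cons] at hmem
        rcases hmem with h | h
        · exact absurd h.symm ha
        · exact h
      have hnd' : (ps.map (·.1)).Nodup := by
        simp only [List.map_cons, List.nodup_cons] at hnd; exact hnd.2
      have hhead : (if ((a1, a2).1 == k) = true then (k, v) else (a1, a2)) = (a1, a2) := by
        simp [ha]
      simp only [List.map_cons, hhead]
      simp only [PySem.Dict.update, List.foldl_cons]
      rw [← PySem.Dict.update, ← PySem.Dict.update, ih (d.insert a1 a2) hnd' hmem']

-- KEY: updating d with (e.insert k v).items = updating with e.items then inserting (k, v)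
theorem pvUpdate_items_insert (d e : PySem.Dict Int (List Int)) (k : Int) (v : List Int)
    (hnd : e.keys.Nodup) :
    d.update ((e.insert k v).items) = (d.update e.items).insert k v := by
  by_cases hc : e.contains k = true
  · rw [PySem.Dict.items_insert_of_contains _ v hc]
    exact pvUpdate_map_replace e.items k v d hnd
      ((PySem.Dict.contains_iff_mem_keys e k).mp hc)
  · rw [PySem.Dict.items_insert_of_not_contains _ v (by simp_all)]
    simp [PySem.Dict.update, List.foldl_append]

-- updating with the items of A's fold from empty = running A's fold from the update target
theorem pvUpdate_pvG (l : List (Int × List Int)) :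
    ∀ (d e : PySem.Dict Int (List Int)), e.keys.Nodup →
    d.update ((pvG e l).items) = pvG (d.update e.items) l := by
  induction l with
  | nil => intro d e _; rfl
  | cons p l ih =>
    intro d e hnd
    have h1 : pvG e (p :: l) = pvG (e.insert p.1 (pvRetrieval p.2)) l := rfl
    have h2 : pvG (d.update e.items) (p :: l)
        = pvG ((d.update e.items).insert p.1 (pvRetrieval p.2)) l := rfl
    rw [h1, h2,
        ih d (e.insert p.1 (pvRetrieval p.2)) (PySem.Dict.nodup_keys_insert e _ _ hnd),
        pvUpdate_items_insert d e p.1 (pvRetrieval p.2) hnd]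

-- B's divide and conquer computes exactly A's fold
theorem pvSolve_eq (rows : List (Int × List Int)) :
    pvSolve rows = (pvG PySem.Dict.empty rows,
      rows.flatMap (fun p => (pvRetrieval p.2).map (fun h => (p.1, h)))) := by
  induction rows using pvSolve.induct with
  | case1 _ _ =>
    simp [pvSolve, pvG]
  | case2 p tl h _ =>
    have htl : tl = [] := by
      cases tl with
      | nil => rfl
      | cons a b => simp at h
    subst htl
    simp [pvSolve, pvG]
  | case3 rows h mid ih1 ih2 =>
    rw [pvSolve]
    simp only [dif_neg h]
    rw [ih1, ih2]
    have hsplit : rows.take (rows.length / 2) ++ rows.drop (rows.length / 2) = rows :=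
      List.take_append_drop _ rows
    refine Prod.ext ?_ ?_
    · show (pvG PySem.Dict.empty (rows.take (rows.length / 2))).update
        ((pvG PySem.Dict.empty (rows.drop (rows.length / 2))).items) = _
      rw [pvUpdate_pvG _ _ PySem.Dict.empty PySem.Dict.nodup_keys_empty]
      have hupd : ∀ (d : PySem.Dict Int (List Int)), d.update PySem.Dict.empty.items = d :=
        fun d => rfl
      rw [hupd]
      show List.foldl _ (List.foldl _ PySem.Dict.empty _) _ = _
      rw [← List.foldl_append, hsplit]
      rfl
    · show _ ++ _ = _
      rw [← List.flatMap_append, hsplit]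

-- ===== VERDICT =====
theorem collect_retrieval_heads_py_spec : Claim_equal_collect_retrieval_heads_py := by
  intro layer_keys matrix _
  unfold Spec_collect_retrieval_heads_py collect_retrieval_heads_py collect_retrieval_heads_py_alt
  simp only [pvFold_split, pvSolve_eq, List.nil_append]
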